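-- pv_equiv track=rewrite | github.com/HoangHoang1408/kg_fact_checking | utils/convert_sample_to_graph_format.py | remap_unknown_entities
-- ===== SOURCE A (Python) =====
-- def remap_unknown_entities(triplets, unknown_prefix="unknown_entity"):
--     unknown_entity_map = {}
--     next_unknown_id = 0
--     remapped_triplets = []
--     for triplet in triplets:
--         remapped_triplet = []
--         for item in triplet:
--             if item.startswith(unknown_prefix):
--                 if item not in unknown_entity_map:
--                     unknown_entity_map[item] = f"{unknown_prefix}_{next_unknown_id}"
--                     next_unknown_id += 1
--                 remapped_triplet.append(unknown_entity_map[item])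
--             else:
--                 remapped_triplet.append(item)
--         remapped_triplets.append(tuple(remapped_triplet))
--     return remapped_triplets
-- ===== SOURCE B (Python) =====
-- def remap_unknown_entities(triplets, unknown_prefix="unknown_entity"):
--     # pass 1: collect unique unknown-prefixed items in first-appearance order
--     uniq = dict.fromkeys(
--         item
--         for triplet in triplets
--         for item in triplet
--         if item.startswith(unknown_prefix)
--     )
--     mapping = {item: f"{unknown_prefix}_{i}" for i, item in enumerate(uniq)}
--     # pass 2: pure lookup remap
--     return [tuple(mapping.get(item, item) for item in triplet) for triplet in triplets]
-- ===== Notes on version B (the rewrite author's own statement) =====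
-- stated objective: alternative
-- what changed: Replaces the single-pass loop that lazily grows the remap table while emitting output with two separately-shaped passes: first a flattened collection of unique unknown-prefixed items (dict.fromkeys) enumerated into the full map, then a pure lookup comprehension over the triplets with no membership/startswith branching.
import Mathlib
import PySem

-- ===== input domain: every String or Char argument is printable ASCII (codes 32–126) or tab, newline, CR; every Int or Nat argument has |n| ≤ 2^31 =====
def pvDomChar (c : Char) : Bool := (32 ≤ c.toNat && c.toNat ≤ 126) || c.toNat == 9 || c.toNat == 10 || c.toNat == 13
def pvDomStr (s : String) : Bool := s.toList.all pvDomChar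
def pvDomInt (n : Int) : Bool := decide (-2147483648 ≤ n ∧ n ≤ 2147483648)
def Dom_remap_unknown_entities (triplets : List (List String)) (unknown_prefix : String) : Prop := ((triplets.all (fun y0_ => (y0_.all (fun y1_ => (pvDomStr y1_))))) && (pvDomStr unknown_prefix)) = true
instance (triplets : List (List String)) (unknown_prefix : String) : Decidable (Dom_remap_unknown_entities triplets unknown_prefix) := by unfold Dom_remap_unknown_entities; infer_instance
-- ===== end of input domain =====

-- B re-implements A's single-pass lazy-table remap as two separately-shaped passes
-- (collect unique unknowns, then pure lookup); equivalence on the return value is proved below.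

-- ===== PORT A =====
-- inner loop body of A: one item of a triplet, state = (unknown_entity_map, next_unknown_id, remapped_triplet)
def pvA_item (p : String) (s : PySem.Dict String String × Int × List String) (item : String) :
    PySem.Dict String String × Int × List String :=
  if PySem.Str.startswith item p then
    -- 'if item not in unknown_entity_map: insert; next_unknown_id += 1'
    let mn := if s.1.contains item = false then
        (s.1.insert item (p ++ "_" ++ PySem.Int.toStr s.2.1), s.2.1 + 1)
      else (s.1, s.2.1)
    -- 'remapped_triplet.append(unknown_entity_map[item])' — the key is always present here,
    -- so Python's subscript cannot raise; the default "" is unreachable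
    (mn.1, mn.2, s.2.2 ++ [mn.1.getD item ""])
  else (s.1, s.2.1, s.2.2 ++ [item])

-- outer loop body of A: one triplet, state = (map, next_id, remapped_triplets)
def pvA_triplet (p : String) (s : PySem.Dict String String × Int × List (List String))
    (t : List String) : PySem.Dict String String × Int × List (List String) :=
  let r := t.foldl (pvA_item p) (s.1, s.2.1, ([] : List String))
  (r.1, r.2.1, s.2.2 ++ [r.2.2])

def remap_unknown_entities (triplets : List (List String)) (unknown_prefix : String) : List (List String) :=
  (triplets.foldl (pvA_triplet unknown_prefix) (PySem.Dict.empty, (0 : Int), ([] : List (List String)))).2.2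

-- ===== PORT B =====
def remap_unknown_entities_alt (triplets : List (List String)) (unknown_prefix : String) : List (List String) :=
  -- pass 1: dict.fromkeys over the flattened filtered stream = ordered dedup
  let uniq : List String :=
    PySem.List.dedup ((triplets.flatMap id).filter (fun item => PySem.Str.startswith item unknown_prefix))
  let mapping : PySem.Dict String String :=
    PySem.Dict.ofList ((PySem.List.enumerate uniq).map
      (fun q => (q.2, unknown_prefix ++ "_" ++ PySem.Int.toStr q.1)))
  -- pass 2: pure lookup with default = the item itself
  triplets.map (fun t => t.map (fun item => mapping.getD item item))

-- ===== PRECONDITION & SPEC =====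
def Spec_remap_unknown_entities (triplets : List (List String)) (unknown_prefix : String) (out : List (List String)) : Prop := out = remap_unknown_entities_alt triplets unknown_prefix
instance (triplets : List (List String)) (unknown_prefix : String) (out : List (List String)) : Decidable (Spec_remap_unknown_entities triplets unknown_prefix out) := by unfold Spec_remap_unknown_entities; infer_instance

-- ===== CLAIM (what is proved, stated in full; the proofs are below) =====
def Claim_equal_remap_unknown_entities : Prop := ∀ (triplets : List (List String)) (unknown_prefix : String), Dom_remap_unknown_entities triplets unknown_prefix → Spec_remap_unknown_entities triplets unknown_prefix (remap_unknown_entities triplets unknown_prefix)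

-- ===== LEMMAS AND PROOFS =====

-- the value both programs assign to an item, relative to a first-appearance list U of unknowns
def pvVal (p : String) (U : List String) (x : String) : String :=
  if PySem.Str.startswith x p then p ++ "_" ++ PySem.Int.toStr (U.idxOf x : Int) else x

-- first-appearance collector (A's traversal order)
def pvColStep (p : String) (S : List String) (x : String) : List String :=
  if PySem.Str.startswith x p then PySem.Set.add S x else S

def pvCol (p : String) (S : List String) (t : List String) : List String :=
  t.foldl (pvColStep p) S

-- the dict A has built after having seen exactly the unknowns S (in order)
def pvM (p : String) (S : List String) : PySem.Dict String String :=
  PySem.Dict.mk ((PySem.List.enumerate S).map (fun q => (q.2, p ++ "_" ++ PySem.Int.toStr q.1)))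

theorem pv_get?_enum (p : String) : ∀ (S : List String) (s : Int) (x : String),
    (PySem.Dict.mk ((PySem.List.enumerate S s).map
        (fun q => (q.2, p ++ "_" ++ PySem.Int.toStr q.1)))).get? x
      = if x ∈ S then some (p ++ "_" ++ PySem.Int.toStr (s + (S.idxOf x : Int))) else none := by
  intro S
  induction S with
  | nil => intro s x; simp [PySem.List.enumerate_nil, PySem.Dict.get?]
  | cons a S ih =>
    intro s x
    rw [PySem.List.enumerate_cons, List.map_cons, PySem.Dict.get?_mk_cons]
    by_cases hax : a = x
    · subst hax
      simp [List.idxOf_cons_self]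
    · have hbeq : (a == x) = false := by simp [hax]
      rw [hbeq, ih (s + 1) x]
      simp only [Bool.false_eq_true, if_false, List.mem_cons]
      by_cases hx : x ∈ S
      · rw [if_pos hx, if_pos (Or.inr hx), List.idxOf_cons_ne S hax]
        push_cast
        ring_nf
      · rw [if_neg hx, if_neg (by tauto)]

theorem pv_keys (p : String) (S : List String) (s : Int) :
    ((PySem.List.enumerate S s).map (fun q => (q.2, p ++ "_" ++ PySem.Int.toStr q.1))).map Prod.fst
      = S := by
  rw [List.map_map]
  exact PySem.List.map_snd_enumerate S s

theorem pv_update_fresh : ∀ (ps : List (String × String)) (d : PySem.Dict String String),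
    (∀ q ∈ ps, d.contains q.1 = false) → (ps.map Prod.fst).Nodup →
    (d.update ps).items = d.items ++ ps := by
  intro ps
  induction ps with
  | nil => intro d _ _; simp [PySem.Dict.update]
  | cons q ps ih =>
    intro d hfresh hnd
    have hq : d.contains q.1 = false := hfresh q (by simp)
    have hins : (d.insert q.1 q.2).items = d.items ++ [q] := by
      simp [PySem.Dict.insert, hq]
    have hstep : d.update (q :: ps) = (d.insert q.1 q.2).update ps := by
      simp [PySem.Dict.update]
    rw [hstep, ih (d.insert q.1 q.2) ?_ ?_, hins, List.append_assoc]
    · rfl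
    · intro r hr
      have hne : q.1 ≠ r.1 := by
        have := hnd
        simp only [List.map_cons, List.nodup_cons] at this
        intro he
        exact this.1 (he ▸ List.mem_map_of_mem hr)
      have hrd : d.contains r.1 = false := hfresh r (by simp [hr])
      simp [PySem.Dict.contains, hins, List.any_append] at hrd ⊢
      exact ⟨hrd, hne⟩
    · simp only [List.map_cons, List.nodup_cons] at hnd
      exact hnd.2

theorem pv_contains (p : String) (S : List String) (x : String) :
    (pvM p S).contains x = decide (x ∈ S) := by
  by_cases hx : x ∈ S
  · have h := pv_get?_enum p S 0 x
    rw [if_pos hx] at h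
    have : (pvM p S).get? x ≠ none := by rw [pvM, h]; simp
    rw [Ne, PySem.Dict.get?_eq_none_iff_contains] at this
    simp [hx]
    exact Bool.not_eq_false _ |>.mp this
  · have h := pv_get?_enum p S 0 x
    rw [if_neg hx] at h
    have : (pvM p S).contains x = false := by
      rw [← PySem.Dict.get?_eq_none_iff_contains, pvM, h]
    simp [hx, this]

theorem pv_val_prefix (p : String) (S U : List String) (h : S <+: U) (x : String)
    (hx : PySem.Str.startswith x p = true → x ∈ S) : pvVal p U x = pvVal p S x := by
  by_cases hs : PySem.Str.startswith x p = true
  · obtain ⟨W, rfl⟩ := h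
    unfold pvVal
    rw [if_pos hs, if_pos hs, List.idxOf_append_of_mem (hx hs)]
  · unfold pvVal
    rw [if_neg hs, if_neg hs]

theorem pv_colStep_prefix (p : String) (S : List String) (x : String) :
    S <+: pvColStep p S x := by
  unfold pvColStep PySem.Set.add
  split
  · split
    · exact List.prefix_refl S
    · exact List.prefix_append S [x]
  · exact List.prefix_refl S

theorem pv_col_prefix (p : String) : ∀ (t : List String) (S : List String), S <+: pvCol p S t := by
  intro t
  induction t with
  | nil => intro S; exact List.prefix_refl S
  | cons x t ih =>
    intro S
    exact (pv_colStep_prefix p S x).trans (ih (pvColStep p S x))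

theorem pv_colAll_prefix (p : String) : ∀ (ts : List (List String)) (S : List String),
    S <+: ts.foldl (pvCol p) S := by
  intro ts
  induction ts with
  | nil => intro S; exact List.prefix_refl S
  | cons t ts ih =>
    intro S
    exact (pv_col_prefix p t S).trans (ih (pvCol p S t))

theorem pv_mem_colStep (p : String) (S : List String) (x : String)
    (hs : PySem.Str.startswith x p = true) : x ∈ pvColStep p S x := by
  unfold pvColStep PySem.Set.add
  rw [if_pos hs]
  split
  · next hc => exact (PySem.Set.contains_iff S x).mp hc
  · simp

theorem pv_mem_col (p : String) : ∀ (t : List String) (S : List String) (x : String),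
    x ∈ t → PySem.Str.startswith x p = true → x ∈ pvCol p S t := by
  intro t
  induction t with
  | nil => intro S x hx; simp at hx
  | cons a t ih =>
    intro S x hx hs
    rcases List.mem_cons.mp hx with h | h
    · subst h
      exact (pv_col_prefix p t (pvColStep p S x)).subset (pv_mem_colStep p S x hs)
    · exact ih (pvColStep p S a) x h hs

-- one triplet of A's loop, from a state described by S
theorem pv_innerA (p : String) : ∀ (t : List String) (S : List String) (acc : List String),
    t.foldl (pvA_item p) (pvM p S, (S.length : Int), acc)
      = (pvM p (pvCol p S t), ((pvCol p S t).length : Int),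
         acc ++ t.map (pvVal p (pvCol p S t))) := by
  intro t
  induction t with
  | nil => intro S acc; simp [pvCol]
  | cons x t ih =>
    intro S acc
    rw [List.foldl_cons]
    by_cases hs : PySem.Str.startswith x p = true
    · have hsC : PySem.Chars.startswith x.toList p.toList = true := by
        rw [← PySem.Str.startswith_eq]; exact hs
      have hcol : pvCol p S (x :: t) = pvCol p (pvColStep p S x) t := rfl
      by_cases hm : x ∈ S
      · -- seen unknown: dict unchanged, append its stored value
        have hstep1 : pvColStep p S x = S := by
          unfold pvColStep PySem.Set.add
          rw [if_pos hs, if_pos ((PySem.Set.contains_iff S x).mpr hm)]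
        have hget : (pvM p S).get? x = some (p ++ "_" ++ PySem.Int.toStr (S.idxOf x : Int)) := by
          have h := pv_get?_enum p S 0 x
          rw [if_pos hm] at h
          simpa using h
        have hA : pvA_item p (pvM p S, (S.length : Int), acc) x
            = (pvM p S, (S.length : Int), acc ++ [p ++ "_" ++ PySem.Int.toStr (S.idxOf x : Int)]) := by
          simp [pvA_item, hsC, pv_contains, hm, PySem.Dict.getD, hget]
        rw [hA, ih S, hcol, hstep1]
        have hval : pvVal p (pvCol p S t) x = p ++ "_" ++ PySem.Int.toStr (S.idxOf x : Int) := by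
          rw [pv_val_prefix p S (pvCol p S t) (pv_col_prefix p t S) x (fun _ => hm)]
          simp [pvVal, hsC]
        simp [hval]
      · -- new unknown: insert, id grows, append the fresh value
        have hstep1 : pvColStep p S x = S ++ [x] := by
          unfold pvColStep PySem.Set.add
          rw [if_pos hs, if_neg (by simpa using hm)]
        have hins : (pvM p S).insert x (p ++ "_" ++ PySem.Int.toStr (S.length : Int))
            = pvM p (S ++ [x]) := by
          have hc : (pvM p S).contains x = false := by simp [pv_contains, hm]
          simp only [PySem.Dict.insert, hc, Bool.false_eq_true, if_false]
          unfold pvM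
          congr 1
          rw [PySem.List.enumerate_append, List.map_append]
          simp [PySem.List.enumerate_cons, PySem.List.enumerate_nil]
        have hidx : ((S ++ [x]).idxOf x : Int) = (S.length : Int) := by
          rw [List.idxOf_append_of_notMem hm]
          simp [List.idxOf_cons_self]
        have hget : (pvM p (S ++ [x])).get? x
            = some (p ++ "_" ++ PySem.Int.toStr (S.length : Int)) := by
          have h := pv_get?_enum p (S ++ [x]) 0 x
          rw [if_pos (by simp)] at h
          rw [pvM, h, hidx]
          simp
        have hA : pvA_item p (pvM p S, (S.length : Int), acc) x
            = (pvM p (S ++ [x]), ((S ++ [x]).length : Int),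
               acc ++ [p ++ "_" ++ PySem.Int.toStr (S.length : Int)]) := by
          have hc : (pvM p S).contains x = false := by simp [pv_contains, hm]
          simp [pvA_item, hsC, hc, hins, PySem.Dict.getD, hget]
        rw [hA, ih (S ++ [x]), hcol, hstep1]
        have hval : pvVal p (pvCol p (S ++ [x]) t) x = p ++ "_" ++ PySem.Int.toStr (S.length : Int) := by
          rw [pv_val_prefix p (S ++ [x]) _ (pv_col_prefix p t (S ++ [x])) x (fun _ => by simp)]
          simp [pvVal, hsC, hidx]
        simp [hval]
    · -- not an unknown: passed through unchanged
      have hsC : ¬ PySem.Chars.startswith x.toList p.toList = true := by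
        rw [← PySem.Str.startswith_eq]; exact hs
      have hstep1 : pvColStep p S x = S := by
        unfold pvColStep
        rw [if_neg hs]
      have hA : pvA_item p (pvM p S, (S.length : Int), acc) x
          = (pvM p S, (S.length : Int), acc ++ [x]) := by
        simp [pvA_item, hsC]
      rw [hA, ih S, show pvCol p S (x :: t) = pvCol p (pvColStep p S x) t from rfl, hstep1]
      have hval : pvVal p (pvCol p S t) x = x := by simp [pvVal, hsC]
      simp [hval]

theorem pv_outerA (p : String) : ∀ (ts : List (List String)) (S : List String)
    (acc : List (List String)),
    ts.foldl (pvA_triplet p) (pvM p S, (S.length : Int), acc)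
      = (pvM p (ts.foldl (pvCol p) S), ((ts.foldl (pvCol p) S).length : Int),
         acc ++ ts.map (fun t => t.map (pvVal p (ts.foldl (pvCol p) S)))) := by
  intro ts
  induction ts with
  | nil => intro S acc; simp
  | cons t ts ih =>
    intro S acc
    rw [List.foldl_cons]
    have hstep : pvA_triplet p (pvM p S, (S.length : Int), acc) t
        = (pvM p (pvCol p S t), ((pvCol p S t).length : Int),
           acc ++ [t.map (pvVal p (pvCol p S t))]) := by
      simp [pvA_triplet, pv_innerA p t S]
    rw [hstep, ih (pvCol p S t)]
    have hlift : t.map (pvVal p (pvCol p S t))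
        = t.map (pvVal p (ts.foldl (pvCol p) (pvCol p S t))) := by
      apply List.map_congr_left
      intro x hx
      exact (pv_val_prefix p (pvCol p S t) _ (pv_colAll_prefix p ts (pvCol p S t)) x
        (fun hs => pv_mem_col p t S x hx hs)).symm
    simp [List.foldl_cons, hlift]

theorem pv_foldl_flatten {g : List String → String → List String} :
    ∀ (ts : List (List String)) (S : List String),
    (ts.flatMap id).foldl g S = ts.foldl (fun S t => t.foldl g S) S := by
  intro ts
  induction ts with
  | nil => intro S; rfl
  | cons t ts ih =>
    intro S
    simp only [List.flatMap_cons, List.foldl_append, List.foldl_cons, id]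
    rw [show (ts.flatMap id).foldl g (t.foldl g S) = _ from ih (t.foldl g S)]

theorem pv_uniq_eq (p : String) (ts : List (List String)) :
    PySem.List.dedup ((ts.flatMap id).filter (fun x => PySem.Str.startswith x p))
      = ts.foldl (pvCol p) [] := by
  rw [PySem.List.dedup_eq_ofList, PySem.Set.ofList, List.foldl_filter]
  have hfun : (fun (acc : List String) (x : String) =>
      if PySem.Str.startswith x p = true then PySem.Set.add acc x else acc) = pvColStep p := by
    funext S x
    unfold pvColStep
    rfl
  rw [hfun]
  exact pv_foldl_flatten ts []

-- ===== VERDICT (by name: the statement is the Claim_ definition above) =====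
theorem remap_unknown_entities_spec : Claim_equal_remap_unknown_entities := by
  intro ts p _
  unfold Spec_remap_unknown_entities remap_unknown_entities remap_unknown_entities_alt
  set U := ts.foldl (pvCol p) [] with hU
  have hinit : (PySem.Dict.empty : PySem.Dict String String) = pvM p [] := rfl
  have hA := pv_outerA p ts [] []
  simp only [List.length_nil, Nat.cast_zero, List.nil_append] at hA
  rw [hinit, hA]
  dsimp only
  -- the B side
  rw [pv_uniq_eq p ts]
  -- mapping = pvM p U
  have hnodupU : U.Nodup := by
    rw [hU, ← pv_uniq_eq p ts, PySem.List.dedup_eq_ofList]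
    exact PySem.Set.nodup_ofList _
  have hmap : PySem.Dict.ofList ((PySem.List.enumerate U).map
      (fun q => (q.2, p ++ "_" ++ PySem.Int.toStr q.1))) = pvM p U := by
    unfold PySem.Dict.ofList pvM
    have h := pv_update_fresh ((PySem.List.enumerate U).map
        (fun q => (q.2, p ++ "_" ++ PySem.Int.toStr q.1))) PySem.Dict.empty
        (fun q _ => PySem.Dict.contains_empty q.1) (by rw [pv_keys]; exact hnodupU)
    cases hd : PySem.Dict.empty.update ((PySem.List.enumerate U).map
        (fun q => (q.2, p ++ "_" ++ PySem.Int.toStr q.1))) with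
    | mk items => rw [hd] at h; simp [PySem.Dict.empty] at h; rw [h]
  rw [hmap]
  -- elementwise
  apply List.map_congr_left
  intro t ht
  apply List.map_congr_left
  intro x hx
  have hxs : x ∈ ts.flatMap id := List.mem_flatMap.mpr ⟨t, ht, hx⟩
  by_cases hs : PySem.Str.startswith x p = true
  · have hxU : x ∈ U := by
      rw [hU, ← pv_uniq_eq p ts, PySem.List.dedup_eq_ofList, PySem.Set.mem_ofList]
      exact List.mem_filter.mpr ⟨hxs, hs⟩
    have hget : (pvM p U).get? x = some (p ++ "_" ++ PySem.Int.toStr (0 + (U.idxOf x : Int))) := by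
      have h := pv_get?_enum p U 0 x
      rw [if_pos hxU] at h
      exact h
    simp only [pvVal, hs, if_true]
    rw [PySem.Dict.getD, hget]
    rw [hU]
    simp
  · have hxU : x ∉ U := by
      intro hmem
      rw [hU, ← pv_uniq_eq p ts, PySem.List.dedup_eq_ofList, PySem.Set.mem_ofList] at hmem
      exact hs (List.mem_filter.mp hmem).2
    have hget : (pvM p U).get? x = none := by
      have h := pv_get?_enum p U 0 x
      rw [if_neg hxU] at h
      exact h
    unfold pvVal
    rw [if_neg (by rw [PySem.Str.startswith_eq] at hs ⊢; exact hs)]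
    rw [PySem.Dict.getD, hget]
    rfl
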